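-- pv_equiv track=rewrite | github.com/CantBeSubh/ProgrammingProjects | Placement/Array/27MaxSumConfig.py | func
-- ===== SOURCE A (Python) =====
-- def func(arr,n):
--     s,w=0,0
--     for i in range(n):
--         s+=arr[i]
--         w+=i*arr[i]
--
--     ma=w
--     for r in range(n-1):
--         w += arr[r]*(n-1)-(s-arr[r])
--         ma=max(ma,w)
--
--     return ma
-- ===== SOURCE B (Python) =====
-- def func(arr, n):
--     # Direct definition: evaluate every rotation's weighted sum explicitly,
--     # no incremental update. Return value only; A raises IndexError when n > len(arr),
--     # B simply returns (slices clamp).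
--     if n <= 0:
--         return 0
--     return max(
--         sum(i * v for i, v in enumerate(arr[k:n] + arr[:k]))
--         for k in range(n)
--     )
-- ===== Notes on version B (the rewrite author's own statement) =====
-- stated objective: alternative
-- what changed: Replaced A's incremental O(1)-per-rotation update of the weighted sum with the direct definition: build each rotation explicitly as a slice concatenation, compute its weighted sum from scratch, and take the maximum.
import Mathlib
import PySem

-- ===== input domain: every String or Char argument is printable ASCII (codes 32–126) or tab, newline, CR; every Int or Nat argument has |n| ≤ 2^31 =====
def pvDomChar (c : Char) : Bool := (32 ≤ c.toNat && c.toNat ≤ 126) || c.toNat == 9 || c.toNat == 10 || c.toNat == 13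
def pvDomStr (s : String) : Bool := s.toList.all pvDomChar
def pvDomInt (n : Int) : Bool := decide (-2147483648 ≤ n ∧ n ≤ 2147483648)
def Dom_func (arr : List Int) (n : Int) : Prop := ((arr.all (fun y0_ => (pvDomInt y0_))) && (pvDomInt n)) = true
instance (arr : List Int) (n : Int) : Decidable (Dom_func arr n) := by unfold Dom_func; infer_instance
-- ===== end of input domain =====

-- B changes the algorithm (direct evaluation of each rotation instead of A's incremental
-- update); equivalence of the RETURN value is proved on Pre_ (n ≤ len arr, where A returns).

-- ===== PORT A =====
-- literal transliteration of A: first loop accumulates (s, w), second loop updates w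
-- incrementally and tracks the running maximum ma; arr[i] is in range under Pre_.
def func (arr : List Int) (n : Int) : Int :=
  let sw := (PySem.List.pyRange 0 n 1).foldl
    (fun (p : Int × Int) i =>
      (p.1 + PySem.List.pyGetD arr i 0, p.2 + i * PySem.List.pyGetD arr i 0)) (0, 0)
  let s := sw.1
  let wma := (PySem.List.pyRange 0 (n - 1) 1).foldl
    (fun (p : Int × Int) r =>
      let w' := p.1 + PySem.List.pyGetD arr r 0 * (n - 1) - (s - PySem.List.pyGetD arr r 0)
      (w', max p.2 w')) (sw.2, sw.2)
  wma.2

-- ===== PORT B =====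
-- literal transliteration of Source B: max over k of the weighted sum of the explicit
-- rotation arr[k:n] + arr[:k]; sum(i*v for i,v in enumerate(rot)) is the mapped sum.
def func_alt (arr : List Int) (n : Int) : Int :=
  if n ≤ 0 then 0
  else
    (PySem.List.max?
      ((PySem.List.pyRange 0 n 1).map (fun k =>
        ((PySem.List.enumerate
            (PySem.List.slice arr (some k) (some n) ++ PySem.List.slice arr none (some k)) 0).map
          (fun p => p.1 * p.2)).sum))
      (fun x => x)).getD 0

-- ===== PRECONDITION & SPEC =====
-- Pre_ excludes exactly the inputs where Python A raises IndexError: n > len(arr).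
def Pre_func (arr : List Int) (n : Int) : Prop := n ≤ (arr.length : Int)
instance (arr : List Int) (n : Int) : Decidable (Pre_func arr n) := by unfold Pre_func; infer_instance
def pvWitness_func : List Int × Int := ([3, -1, 4, 2], 4)

def Spec_func (arr : List Int) (n : Int) (out : Int) : Prop := out = func_alt arr n
instance (arr : List Int) (n : Int) (out : Int) : Decidable (Spec_func arr n out) := by unfold Spec_func; infer_instance

-- ===== CLAIM (what is proved, stated in full; the proofs are below) =====
def Claim_equal_func : Prop := ∀ (arr : List Int) (n : Int), Dom_func arr n → Pre_func arr n → Spec_func arr n (func arr n)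

-- ===== LEMMAS AND PROOFS =====

-- weighted sum Σ (s+i) * l[i], the value B computes for one rotation
def pvGs (l : List Int) (s : Int) : Int :=
  ((PySem.List.enumerate l s).map (fun p => p.1 * p.2)).sum

theorem pvGs_nil (s : Int) : pvGs [] s = 0 := by
  simp [pvGs, PySem.List.enumerate_nil]

theorem pvGs_cons (x : Int) (xs : List Int) (s : Int) :
    pvGs (x :: xs) s = s * x + pvGs xs (s + 1) := by
  simp [pvGs, PySem.List.enumerate_cons]

theorem pvGs_shift (xs : List Int) (s : Int) :
    pvGs xs (s + 1) = pvGs xs s + xs.sum := by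
  induction xs generalizing s with
  | nil => simp [pvGs_nil]
  | cons x xs ih =>
    rw [pvGs_cons, pvGs_cons, ih (s + 1), ih s]
    push_cast [List.sum_cons]; ring

theorem pvGs_append_singleton (xs : List Int) (x : Int) (s : Int) :
    pvGs (xs ++ [x]) s = pvGs xs s + (s + xs.length) * x := by
  induction xs generalizing s with
  | nil => simp [pvGs_nil, pvGs_cons]
  | cons y ys ih =>
    rw [List.cons_append, pvGs_cons, pvGs_cons, ih (s + 1)]
    push_cast [List.length_cons]; ring

-- the incremental-update identity A relies on
theorem pvG_rotate_step (x : Int) (xs : List Int) :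
    pvGs (xs ++ [x]) 0 = pvGs (x :: xs) 0 + x * ((x :: xs).length - 1) - ((x :: xs).sum - x) := by
  rw [pvGs_append_singleton, pvGs_cons, pvGs_shift]
  push_cast [List.length_cons, List.sum_cons]; ring


def pvRotVal (arr : List Int) (m j : Nat) : Int :=
  pvGs ((arr.take m).drop j ++ (arr.take m).take j) 0

-- the function mapped over range(n) in func_alt
def pvF (arr : List Int) (n : Int) (k : Int) : Int :=
  ((PySem.List.enumerate
      (PySem.List.slice arr (some k) (some n) ++ PySem.List.slice arr none (some k)) 0).map
    (fun p => p.1 * p.2)).sum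

theorem pvF_natCast (arr : List Int) (m j : Nat) (hj : j ≤ m) (_hmlen : m ≤ arr.length) :
    pvF arr (m : Int) (j : Int) = pvRotVal arr m j := by
  unfold pvF pvRotVal pvGs
  rw [PySem.List.slice_natCast, PySem.List.slice_to_natCast]
  rw [List.drop_take, List.take_take, Nat.min_eq_left hj]

theorem pv_loop1 (arr : List Int) : ∀ (m : Nat), m ≤ arr.length →
    (PySem.List.pyRange 0 (m : Int) 1).foldl
      (fun (p : Int × Int) i =>
        (p.1 + PySem.List.pyGetD arr i 0, p.2 + i * PySem.List.pyGetD arr i 0)) (0, 0)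
    = ((arr.take m).sum, pvGs (arr.take m) 0) := by
  intro m
  induction m with
  | zero => intro _; simp [PySem.List.pyRange_one_eq_nil, pvGs_nil]
  | succ m ih =>
    intro hlen
    have hm : m < arr.length := by omega
    have hcast : ((m + 1 : Nat) : Int) = (m : Int) + 1 := by push_cast; ring
    rw [hcast, PySem.List.pyRange_one_succ_right (by positivity), List.foldl_append,
        ih (by omega)]
    have hget : PySem.List.pyGetD arr (m : Int) 0 = arr[m] := PySem.List.pyGetD_ofNat (xs := arr) (n := m) (d := 0) hm
    have htake : arr.take (m + 1) = arr.take m ++ [arr[m]] := by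
      rw [List.take_add_one, List.getElem?_eq_getElem hm]; rfl
    simp only [List.foldl_cons, List.foldl_nil, hget, htake, List.sum_append,
      pvGs_append_singleton, List.length_take, Nat.min_eq_left hm.le]
    simp

theorem pv_rot_sum (a : List Int) (j : Nat) : (a.drop j ++ a.take j).sum = a.sum := by
  rw [List.sum_append]
  conv_rhs => rw [← List.take_append_drop j a]
  rw [List.sum_append]; ring

theorem pv_rot_len (a : List Int) (j : Nat) (hj : j ≤ a.length) :
    (a.drop j ++ a.take j).length = a.length := by
  simp; omega

theorem pv_rot_step (a : List Int) (j : Nat) (hj : j < a.length) :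
    pvGs (a.drop (j + 1) ++ a.take (j + 1)) 0
      = pvGs (a.drop j ++ a.take j) 0 + a[j] * ((a.length : Int) - 1) - (a.sum - a[j]) := by
  have hdrop : a.drop j = a[j] :: a.drop (j + 1) := List.drop_eq_getElem_cons hj
  have htake : a.take (j + 1) = a.take j ++ [a[j]] := by
    rw [List.take_add_one, List.getElem?_eq_getElem hj]; rfl
  have h1 : a[j] :: (a.drop (j + 1) ++ a.take j) = a.drop j ++ a.take j := by
    rw [hdrop, List.cons_append]
  rw [htake, ← List.append_assoc, pvG_rotate_step, h1, pv_rot_len a j hj.le, pv_rot_sum]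

theorem pv_loop2 (arr : List Int) (m : Nat) (hm : 0 < m) (hlen : m ≤ arr.length) :
    ∀ t : Nat, t ≤ m - 1 →
    (PySem.List.pyRange 0 (t : Int) 1).foldl
      (fun (p : Int × Int) r =>
        (p.1 + PySem.List.pyGetD arr r 0 * ((m : Int) - 1)
           - ((arr.take m).sum - PySem.List.pyGetD arr r 0),
         max p.2 (p.1 + PySem.List.pyGetD arr r 0 * ((m : Int) - 1)
           - ((arr.take m).sum - PySem.List.pyGetD arr r 0)))) (pvRotVal arr m 0, pvRotVal arr m 0)
    = (pvRotVal arr m t,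
       ((PySem.List.pyRange 1 ((t : Int) + 1) 1).map (pvF arr (m : Int))).foldl max
         (pvRotVal arr m 0)) := by
  intro t
  induction t with
  | zero => intro _; simp [PySem.List.pyRange_one_eq_nil]
  | succ t ih =>
    intro ht
    have hcast : ((t + 1 : Nat) : Int) = (t : Int) + 1 := by push_cast; ring
    have htm : t < m := by omega
    have htlen : t < arr.length := by omega
    have ha_len : (arr.take m).length = m := by simp [Nat.min_eq_left hlen]
    have hget : PySem.List.pyGetD arr (t : Int) 0 = arr[t] := PySem.List.pyGetD_ofNat (xs := arr) (n := t) (d := 0) htlen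
    have hat : (arr.take m)[t]'(by omega) = arr[t] := List.getElem_take
    rw [hcast, PySem.List.pyRange_one_succ_right (by positivity), List.foldl_append,
        ih (by omega)]
    have hstep := pv_rot_step (arr.take m) t (by omega)
    rw [hat, ha_len] at hstep
    have hfv : pvF arr (m : Int) ((t : Int) + 1) = pvRotVal arr m (t + 1) := by
      have := pvF_natCast arr m (t + 1) (by omega) hlen
      rwa [hcast] at this
    rw [show PySem.List.pyRange 1 ((t : Int) + 1 + 1) 1
          = PySem.List.pyRange 1 ((t : Int) + 1) 1 ++ [(t : Int) + 1] from
        PySem.List.pyRange_one_succ_right (by omega), List.map_append, List.foldl_append]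
    simp only [List.foldl_cons, List.foldl_nil, List.map_cons, List.map_nil, hget, hfv]
    unfold pvRotVal
    rw [hstep]

theorem func_eq_of_pos (arr : List Int) (m : Nat) (hm : 0 < m) (hlen : m ≤ arr.length) :
    func arr (m : Int) = func_alt arr (m : Int) := by
  have hR0 : pvRotVal arr m 0 = pvGs (arr.take m) 0 := by
    unfold pvRotVal; simp
  have hA : func arr (m : Int)
      = ((PySem.List.pyRange 1 (m : Int) 1).map (pvF arr (m : Int))).foldl max
          (pvRotVal arr m 0) := by
    have hc : ((m : Int) - 1) = ((m - 1 : Nat) : Int) := by omega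
    have hc2 : ((m - 1 : Nat) : Int) + 1 = (m : Int) := by omega
    simp only [func, pv_loop1 arr m hlen]
    rw [show PySem.List.pyRange 0 ((m : Int) - 1) 1
          = PySem.List.pyRange 0 ((m - 1 : Nat) : Int) 1 from by rw [hc]]
    rw [← hR0, pv_loop2 arr m hm hlen (m - 1) le_rfl, hc2]
  have hB : func_alt arr (m : Int)
      = ((PySem.List.pyRange 1 (m : Int) 1).map (pvF arr (m : Int))).foldl max
          (pvF arr (m : Int) 0) := by
    unfold func_alt
    rw [if_neg (by omega)]
    rw [PySem.List.pyRange_one_cons (by exact_mod_cast hm)]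
    show ((PySem.List.max? (pvF arr (m : Int) 0 :: (PySem.List.pyRange 1 (m : Int) 1).map (pvF arr (m : Int))) (fun x => x)).getD 0) = _
    rw [PySem.List.max?_id_cons]
    rfl
  have hF0 : pvF arr (m : Int) 0 = pvRotVal arr m 0 := by
    have := pvF_natCast arr m 0 (by omega) hlen
    simpa using this
  rw [hA, hB, hF0]

theorem func_spec : Claim_equal_func := by
  intro arr n _ hpre
  unfold Spec_func
  by_cases hn : n ≤ 0
  · unfold func func_alt
    rw [if_pos hn]
    simp [PySem.List.pyRange_one_eq_nil (by omega : n ≤ 0),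
          PySem.List.pyRange_one_eq_nil (by omega : n - 1 ≤ 0)]
  · have hm : 0 < n.toNat := by omega
    have hcast : ((n.toNat : Int)) = n := by omega
    rw [← hcast]
    exact func_eq_of_pos arr n.toNat hm (by unfold Pre_func at hpre; omega)
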